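-- pv_equiv track=rewrite | github.com/fengxuebailu/Tetris.js | Tetris.py | count_holes
-- ===== SOURCE A (Python) =====
-- def count_holes(board):
--     """计算空洞数量"""
--     holes = 0
--     for j in range(len(board[0])):
--         found_block = False
--         for i in range(len(board)):
--             if board[i][j]:
--                 found_block = True
--             elif found_block:
--                 holes += 1
--     return holes
-- ===== SOURCE B (Python) =====
-- def count_holes(board):
--     """计算空洞数量"""
--     n = len(board)
--     w = len(board[0])
--     filled = [0] * w
--     top = [n] * w
--     for i, row in enumerate(board):
--         filled = [f + (1 if c else 0) for f, c in zip(filled, row)]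
--         top = [(min(t, i) if c else t) for t, c in zip(top, row)]
--     return sum(n - t - f for t, f in zip(top, filled) if f)
-- ===== Notes on version B (the rewrite author's own statement) =====
-- stated objective: alternative
-- what changed: Replaces A's column-major scan threading a found_block flag by a row-major single pass that maintains per-column filled counts and topmost-filled indices, then obtains the holes by the arithmetic identity holes_j = rows - top_j - filled_j for each non-empty column.
import Mathlib
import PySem

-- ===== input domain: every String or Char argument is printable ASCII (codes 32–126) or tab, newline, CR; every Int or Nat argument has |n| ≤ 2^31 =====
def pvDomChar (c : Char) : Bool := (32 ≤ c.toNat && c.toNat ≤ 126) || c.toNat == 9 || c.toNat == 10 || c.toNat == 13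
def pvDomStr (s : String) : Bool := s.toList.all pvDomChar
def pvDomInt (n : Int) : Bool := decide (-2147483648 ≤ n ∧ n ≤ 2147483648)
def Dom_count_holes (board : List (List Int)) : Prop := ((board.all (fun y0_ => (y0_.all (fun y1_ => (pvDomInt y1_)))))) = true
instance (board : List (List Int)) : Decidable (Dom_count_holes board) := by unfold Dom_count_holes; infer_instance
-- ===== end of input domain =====

-- B replaces A's column-major flag scan by a row-major pass keeping per-column filled counts and
-- topmost-filled row indices, combining them by holes_j = rows - top_j - filled_j; same cost (alternative).

-- ===== PORT A =====
def count_holes (board : List (List Int)) : Int :=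
  (PySem.List.pyRange 0 ((PySem.List.pyGetD board 0 []).length : Int) 1).foldl
    (fun holes j =>
      ((PySem.List.pyRange 0 (board.length : Int) 1).foldl
        (fun (st : Int × Bool) i =>
          if PySem.List.pyGetD (PySem.List.pyGetD board i []) j 0 ≠ 0 then (st.1, true)
          else if st.2 then (st.1 + 1, st.2) else st)
        (holes, false)).1)
    0

-- ===== PORT B =====
def count_holes_alt (board : List (List Int)) : Int :=
  let n : Int := (board.length : Int)
  let w : Nat := (PySem.List.pyGetD board 0 []).length
  let st :=
    (PySem.List.enumerate board).foldl
      (fun (st : List Int × List Int) p =>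
        (List.zipWith (fun f c => f + (if c ≠ 0 then 1 else 0)) st.1 p.2,
         List.zipWith (fun t c => if c ≠ 0 then min t p.1 else t) st.2 p.2))
      (List.replicate w 0, List.replicate w n)
  ((st.2.zip st.1).filter (fun tf => tf.2 != 0)).foldl
    (fun acc tf => acc + (n - tf.1 - tf.2)) 0

-- ===== PRECONDITION & SPEC =====
-- Pre_ excludes exactly the inputs where A raises IndexError: the empty board (board[0])
-- and boards where some row is shorter than row 0 (board[i][j] out of range).
def Pre_count_holes (board : List (List Int)) : Prop :=
  board ≠ [] ∧ ∀ r ∈ board, (board.getD 0 []).length ≤ r.length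
instance (board : List (List Int)) : Decidable (Pre_count_holes board) := by
  unfold Pre_count_holes; infer_instance
def pvWitness_count_holes : List (List Int) := [[1, 0], [0, 1], [0, 0]]
def Spec_count_holes (board : List (List Int)) (out : Int) : Prop := out = count_holes_alt board
instance (board : List (List Int)) (out : Int) : Decidable (Spec_count_holes board out) := by unfold Spec_count_holes; infer_instance

-- ===== CLAIM (what is proved, stated in full; the proofs are below) =====
def Claim_equal_count_holes : Prop := ∀ (board : List (List Int)), Dom_count_holes board → Pre_count_holes board → Spec_count_holes board (count_holes board)

-- ===== LEMMAS AND PROOFS =====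

-- column j of the board, read with Python's default-0 semantics / plain getD
def colI (board : List (List Int)) (j : Int) : List Int :=
  board.map (fun r => PySem.List.pyGetD r j 0)
def colA (board : List (List Int)) (j : Nat) : List Int :=
  board.map (fun r => r.getD j 0)
-- the per-column hole count as A computes it: empties strictly below the topmost filled cell
def colHoles (col : List Int) : Int :=
  match col.findIdx? (fun c => c != 0) with
  | none => 0
  | some t => (((col.drop (t + 1)).filter (fun c => c == 0)).length : Int)

-- ========== A-side ==========

-- once the flag is set, the rest of the inner loop just counts zeros
theorem flag_set_loop (col : List Int) (h : Int) :
    col.foldl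
      (fun (st : Int × Bool) c =>
        if c ≠ 0 then (st.1, true)
        else if st.2 then (st.1 + 1, st.2) else st) (h, true)
    = (h + ((col.filter (fun c => c == 0)).length : Int), true) := by
  induction col generalizing h with
  | nil => simp
  | cons c rest ih =>
    rw [List.foldl_cons]
    by_cases hc : c = 0
    · rw [if_neg (by simp [hc])]
      have hstep : (if ((h, true) : Int × Bool).2 = true
          then ((h, true).1 + 1, ((h, true) : Int × Bool).2) else (h, true)) = (h + 1, true) := rfl
      rw [hstep, ih, List.filter_cons, if_pos (by simp [hc])]
      simp
      ring
    · rw [if_pos hc, ih, List.filter_cons, if_neg (by simp [hc])]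

theorem inner_loop_eq (col : List Int) (h : Int) :
    (col.foldl
      (fun (st : Int × Bool) c =>
        if c ≠ 0 then (st.1, true)
        else if st.2 then (st.1 + 1, st.2) else st) (h, false)).1
    = h + colHoles col := by
  induction col generalizing h with
  | nil => simp [colHoles]
  | cons c rest ih =>
    rw [List.foldl_cons]
    by_cases hc : c = 0
    · rw [if_neg (by simp [hc])]
      have hstep : (if ((h, false) : Int × Bool).2 = true
          then ((h, false).1 + 1, ((h, false) : Int × Bool).2) else (h, false)) = (h, false) := rfl
      rw [hstep, ih]
      unfold colHoles
      rw [List.findIdx?_cons, if_neg (by simp [hc])]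
      cases hfi : rest.findIdx? (fun c => c != 0) with
      | none => simp
      | some t => simp [List.drop_succ_cons]
    · rw [if_pos hc, flag_set_loop]
      unfold colHoles
      rw [List.findIdx?_cons, if_pos (by simp [hc])]
      simp

theorem A_eq_sum (board : List (List Int)) :
    count_holes board
    = ((List.range (board.getD 0 []).length).map (fun j => colHoles (colA board j))).sum := by
  unfold count_holes
  have h1 : (PySem.List.pyRange 0 ((PySem.List.pyGetD board 0 []).length : Int) 1).foldl
      (fun holes j =>
        ((PySem.List.pyRange 0 (board.length : Int) 1).foldl
          (fun (st : Int × Bool) i =>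
            if PySem.List.pyGetD (PySem.List.pyGetD board i []) j 0 ≠ 0 then (st.1, true)
            else if st.2 then (st.1 + 1, st.2) else st)
          (holes, false)).1)
      0
    = (PySem.List.pyRange 0 ((PySem.List.pyGetD board 0 []).length : Int) 1).foldl
      (fun holes j => holes + colHoles (colI board j)) 0 := by
    refine List.foldl_ext _ _ _ ?_
    intro total j _
    rw [PySem.List.foldl_pyRange_zero_pyGetD' board []
          (fun (st : Int × Bool) row =>
            if PySem.List.pyGetD row j 0 ≠ 0 then (st.1, true)
            else if st.2 then (st.1 + 1, st.2) else st) (total, false),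
        ← List.foldl_map (f := fun row => PySem.List.pyGetD row j 0)
          (g := fun (st : Int × Bool) (c : Int) =>
            if c ≠ 0 then (st.1, true) else if st.2 then (st.1 + 1, st.2) else st)
          (l := board) (init := (total, false)), inner_loop_eq]
    rfl
  rw [h1, PySem.List.foldl_add, PySem.List.pyRange_one, List.map_map]
  simp only [PySem.List.pyGetD_zero, zero_add, Int.sub_zero, Int.toNat_natCast]
  refine congrArg List.sum (List.map_inj_left.mpr fun k _ => ?_)
  simp [colI, colA, Function.comp]

-- ========== B-side ==========

theorem pair_foldl {α β γ : Type} (h1 : α → γ → α) (h2 : β → γ → β) (l : List γ) (a : α) (b : β) :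
    l.foldl (fun st p => (h1 st.1 p, h2 st.2 p)) (a, b) = (l.foldl h1 a, l.foldl h2 b) := by
  induction l generalizing a b with
  | nil => rfl
  | cons x xs ih => simp [List.foldl_cons, ih]

theorem zipWith_map_range (g : Int → Int → Int) (F : Nat → Int) (row : List Int) (w : Nat)
    (h : w ≤ row.length) :
    List.zipWith g ((List.range w).map F) row
    = (List.range w).map (fun j => g (F j) (row.getD j 0)) := by
  apply List.ext_getElem
  · simp [Nat.min_eq_left h]
  · intro i h1 h2
    simp only [List.getElem_zipWith, List.getElem_map, List.getElem_range]
    rw [List.getD_eq_getElem]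

theorem filled_fold (rows : List (List Int)) (w : Nat) (F : Nat → Int)
    (h : ∀ r ∈ rows, w ≤ r.length) :
    rows.foldl (fun fl row => List.zipWith (fun f c => f + (if c ≠ 0 then 1 else 0)) fl row)
        ((List.range w).map F)
    = (List.range w).map
        (fun j => F j + ((rows.map (fun r => r.getD j 0)).countP (fun c => c != 0) : Int)) := by
  induction rows generalizing F with
  | nil => simp
  | cons row rest ih =>
    rw [List.foldl_cons, zipWith_map_range _ _ _ _ (h row (List.mem_cons_self)),
        ih _ (fun r hr => h r (List.mem_cons_of_mem _ hr))]
    refine List.map_inj_left.mpr (fun j _ => ?_)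
    simp only [List.map_cons, List.countP_cons, List.getD_eq_getElem?_getD]
    generalize row[j]?.getD 0 = c
    by_cases hc : c = 0
    · simp [hc]
    · simp [hc]
      ring

theorem top_fold (rows : List (List Int)) (w : Nat) (s : Int) (T : Nat → Int)
    (h : ∀ r ∈ rows, w ≤ r.length) :
    (PySem.List.enumerate rows s).foldl
        (fun tp p => List.zipWith (fun t c => if c ≠ 0 then min t p.1 else t) tp p.2)
        ((List.range w).map T)
    = (List.range w).map (fun j =>
        match (rows.map (fun r => r.getD j 0)).findIdx? (fun c => c != 0) with
        | none => T j
        | some t => min (T j) (s + t)) := by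
  induction rows generalizing s T with
  | nil => simp [PySem.List.enumerate]
  | cons row rest ih =>
    rw [PySem.List.enumerate_cons, List.foldl_cons,
        zipWith_map_range _ _ _ _ (h row (List.mem_cons_self)),
        ih _ _ (fun r hr => h r (List.mem_cons_of_mem _ hr))]
    refine List.map_inj_left.mpr (fun j _ => ?_)
    simp only [List.map_cons, List.findIdx?_cons, List.getD_eq_getElem?_getD]
    generalize row[j]?.getD 0 = c
    by_cases hc : c = 0
    · rw [if_neg (by simp [hc]), if_neg (by simp [hc])]
      cases hfi : (rest.map (fun r => r[j]?.getD 0)).findIdx? (fun c => c != 0) with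
      | none => simp
      | some t =>
        simp only [Option.map_some]
        have : s + 1 + (t : Int) = s + ((t : Int) + 1) := by ring
        simp [this]
    · rw [if_pos (by simp [hc]), if_pos (by simp [hc])]
      cases hfi : (rest.map (fun r => r[j]?.getD 0)).findIdx? (fun c => c != 0) with
      | none => simp
      | some t =>
        simp only []
        have hms : min s (s + 1 + (t : Int)) = s := min_eq_left (by omega)
        rw [min_assoc, hms]
        simp

theorem foldl_enumerate_snd {α β : Type} (g : β → α → β) (l : List α) (s : Int) (init : β) :
    (PySem.List.enumerate l s).foldl (fun a p => g a p.2) init = l.foldl g init := by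
  induction l generalizing s init with
  | nil => simp [PySem.List.enumerate]
  | cons x xs ih => rw [PySem.List.enumerate_cons, List.foldl_cons, List.foldl_cons, ih]

theorem sum_map_filter_eq {α : Type} (l : List α) (p : α → Bool) (g : α → Int) :
    ((l.filter p).map g).sum = (l.map (fun x => if p x then g x else 0)).sum := by
  induction l with
  | nil => simp
  | cons a l ih =>
    by_cases hp : p a <;> simp [hp, ih]

-- per-column arithmetic: (rows - top - filled) for a non-empty column is A's zero count below top
theorem col_formula (col : List Int) :
    (if (((col.countP (fun c => c != 0) : Nat) : Int) != 0) = true then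
        (col.length : Int)
          - (match col.findIdx? (fun c => c != 0) with
             | none => (col.length : Int)
             | some t => min (col.length : Int) ((0 : Int) + t))
          - ((col.countP (fun c => c != 0) : Nat) : Int)
     else 0)
    = colHoles col := by
  cases hfi : col.findIdx? (fun c => c != 0) with
  | none =>
    have hz : col.countP (fun c => c != 0) = 0 :=
      List.countP_eq_zero.mpr (by
        intro a ha
        have := List.findIdx?_eq_none_iff.mp hfi a ha
        simp [this])
    simp [colHoles, hfi, hz]
  | some t =>
    obtain ⟨ht, hpt, hbefore⟩ := List.findIdx?_eq_some_iff_getElem.mp hfi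
    have hmin : min (col.length : Int) ((0 : Int) + t) = (t : Int) := by
      rw [zero_add]; exact min_eq_right (by exact_mod_cast Nat.le_of_lt ht)
    -- split col at index t
    have hsplit : col.countP (fun c => c != 0)
        = (col.take t).countP (fun c => c != 0) + (col.drop t).countP (fun c => c != 0) := by
      conv_lhs => rw [← List.take_append_drop t col]
      rw [List.countP_append]
    have htake : (col.take t).countP (fun c => c != 0) = 0 := by
      refine List.countP_eq_zero.mpr ?_
      intro a ha
      obtain ⟨i, hi, rfl⟩ := List.getElem_of_mem ha
      have hi' : i < t := by
        simp [List.length_take] at hi; omega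
      have h2 : (col.take t)[i] = col[i]'(by omega) := List.getElem_take
      rw [h2]
      exact hbefore i hi'
    have hdrop : (col.drop t) = col[t] :: col.drop (t + 1) := List.drop_eq_getElem_cons ht
    have hnzdrop : (col.drop t).countP (fun c => c != 0)
        = 1 + (col.drop (t + 1)).countP (fun c => c != 0) := by
      rw [hdrop, List.countP_cons]
      simp [hpt]
      omega
    have hpart : (col.drop (t + 1)).length
        = (col.drop (t + 1)).countP (fun c => c != 0)
          + (col.drop (t + 1)).countP (fun c => c == 0) := by
      have := List.length_eq_countP_add_countP (fun c : Int => c != 0) (l := col.drop (t + 1))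
      rw [this]
      congr 1
      refine List.countP_congr (fun a _ => ?_)
      by_cases ha : a = 0 <;> simp [ha]
    have hlen : (col.drop (t + 1)).length = col.length - (t + 1) := List.length_drop
    have hzeros : colHoles col = (((col.drop (t + 1)).countP (fun c => c == 0) : Nat) : Int) := by
      simp [colHoles, hfi, List.countP_eq_length_filter]
    rw [hzeros]
    rw [if_pos (by
      simp only [bne_iff_ne, ne_eq]
      intro hzero
      have : col.countP (fun c => c != 0) = 0 := by exact_mod_cast hzero
      rw [hsplit, htake, hnzdrop] at this
      omega)]
    simp only [hmin]
    rw [hsplit, htake, hnzdrop]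
    have h1 : t + 1 ≤ col.length := ht
    push_cast
    omega

theorem map_range_const {α : Type} (w : Nat) (x : α) :
    (List.range w).map (fun _ => x) = List.replicate w x := by
  simp

theorem B_eq_sum (board : List (List Int)) (hlen : ∀ r ∈ board, (board.getD 0 []).length ≤ r.length) :
    count_holes_alt board
    = ((List.range (board.getD 0 []).length).map
        (fun j =>
          if ((((colA board j).countP (fun c => c != 0) : Nat) : Int) != 0) = true then
            (board.length : Int)
              - (match (colA board j).findIdx? (fun c => c != 0) with
                 | none => (board.length : Int)
                 | some t => min (board.length : Int) ((0 : Int) + t))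
              - (((colA board j).countP (fun c => c != 0) : Nat) : Int)
          else 0)).sum := by
  unfold count_holes_alt
  simp only []
  set w := (PySem.List.pyGetD board 0 []).length with hw
  have hw' : w = (board.getD 0 []).length := by rw [hw, PySem.List.pyGetD_zero]
  rw [← map_range_const w (0 : Int), ← map_range_const w ((board.length : Int))]
  have hp := pair_foldl
      (fun a (p : Int × List Int) => List.zipWith (fun f c => f + (if c ≠ 0 then 1 else 0)) a p.2)
      (fun b (p : Int × List Int) => List.zipWith (fun t c => if c ≠ 0 then min t p.1 else t) b p.2)
      (PySem.List.enumerate board)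
      ((List.range w).map (fun _ => (0 : Int)))
      ((List.range w).map (fun _ => ((board.length : Nat) : Int)))
  simp only [] at hp
  rw [hp]
  rw [foldl_enumerate_snd (fun fl row => List.zipWith (fun f c => f + (if c ≠ 0 then 1 else 0)) fl row) board 0,
      filled_fold board w _ (by rw [hw']; exact hlen),
      top_fold board w 0 _ (by rw [hw']; exact hlen)]
  rw [List.zip_map', List.filter_map, PySem.List.foldl_add, List.map_map,
      sum_map_filter_eq]
  rw [hw', zero_add]
  refine congrArg List.sum (List.map_inj_left.mpr fun j hj => ?_)
  simp [colA]

-- ===== VERDICT (by name: the statement is the Claim_ definition above) =====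
theorem count_holes_spec : Claim_equal_count_holes := by
  intro board _ hpre
  unfold Spec_count_holes
  rw [A_eq_sum, B_eq_sum board hpre.2]
  refine congrArg List.sum (List.map_inj_left.mpr fun j hj => ?_)
  have hlen : (colA board j).length = board.length := by simp [colA]
  have hcf := col_formula (colA board j)
  rw [hlen] at hcf
  exact hcf.symm
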